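-- pv_equiv track=rewrite | github.com/daniel-reich/turbo-robot | htMy9tkX4wFWHZtsY_17.py | palindrome_time
-- ===== SOURCE A (Python) =====
-- def palindrome_time(lst):
--   c=0
--   if lst[0:3]==lst[3:6]:
--     return 1
--   c=(lst[3]-lst[0])*6
--   if lst[4]>lst[1]:
--     for i in range(lst[1],lst[4]+1):
--       if i%11==0 or i==0:
--         c=c+1
--   elif lst[4]<lst[1]:
--     for i in range(lst[4],lst[1]+1):
--       if i%11==0 or i==0:
--         c=c-1
--   elif lst[4]==lst[1]:
--     c=c+1
--   if lst[3]<=19 and lst[0]>=16: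
--     return 0
--   elif lst[3]>19 and lst[0]<6:
--     c=c-48
--     if c<0:
--       return 0
--     else:
--       return c
--   elif lst[3]<=9 and lst[0]>=6:
--     return 0
--   elif lst[3]<16 and lst[3]>9 and lst[0]<6:
--     c=c-24
--     if c<0:
--       return 0
--     else:
--       return c
--   elif lst[0]<5 and lst[3]>19:
--     c=c-48
--     if c<0:
--       return 0
--     else:
--       return c
--   elif lst[3]<5 or lst[0]>9 and lst[3]<16 or lst[0]>19 and lst[3]<=23:
--     return c
-- ===== SOURCE B (Python) =====
-- def palindrome_time(lst):
--     if lst[0:3] == lst[3:6]: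
--         return 1
--     a, b, d, e = lst[0], lst[1], lst[3], lst[4]
--     # count multiples of 11 in an inclusive range by arithmetic, no loop
--     c = (d - a) * 6
--     if e > b:
--         c += e // 11 - (b - 1) // 11
--     elif e < b:
--         c -= b // 11 - (e - 1) // 11
--     else:
--         c += 1
--     if (d <= 19 and a >= 16) or (d <= 9 and a >= 6):
--         return 0
--     if d > 19 and a < 6:
--         return max(c - 48, 0)
--     if 9 < d < 16 and a < 6:
--         return max(c - 24, 0)
--     if d < 5 or (a > 9 and d < 16) or (a > 19 and d <= 23):
--         return c
--     return None
-- ===== Notes on version B (the rewrite author's own statement) =====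
-- stated objective: simpler
-- what changed: The two counting loops over range(lst[1],lst[4]+1) are replaced by a closed-form count of multiples of 11 (hi//11 - (lo-1)//11), and the trailing branch chain is condensed (the two 0-cases merged, the subsumed fifth branch dropped, clamp-to-zero written as max).
-- outside the precondition, e.g. on palindrome_time([1]): A raises IndexError, B raises IndexError; on palindrome_time([4]): A raises IndexError, B raises IndexError
import Mathlib
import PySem

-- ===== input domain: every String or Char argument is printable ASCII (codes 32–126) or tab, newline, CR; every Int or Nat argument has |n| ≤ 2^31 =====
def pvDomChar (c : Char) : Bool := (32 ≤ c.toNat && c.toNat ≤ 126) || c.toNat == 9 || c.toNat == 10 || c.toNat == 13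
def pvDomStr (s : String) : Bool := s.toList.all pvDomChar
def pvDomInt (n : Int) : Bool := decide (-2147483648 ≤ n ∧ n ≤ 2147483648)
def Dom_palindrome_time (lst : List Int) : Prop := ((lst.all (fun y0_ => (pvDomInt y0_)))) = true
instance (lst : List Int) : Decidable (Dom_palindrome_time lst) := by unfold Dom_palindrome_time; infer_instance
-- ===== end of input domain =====

-- B replaces A's two element-by-element counting loops over range(lst[1], lst[4]+1) by a
-- closed-form count of multiples of 11 and condenses the trailing branch chain (objective: simpler).


-- ===== PORT A =====
def palindrome_time (lst : List Int) : Option Int :=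
  if PySem.List.slice lst (some 0) (some 3) = PySem.List.slice lst (some 3) (some 6) then some 1
  else
    match PySem.List.pyGet? lst 0, PySem.List.pyGet? lst 1,
          PySem.List.pyGet? lst 3, PySem.List.pyGet? lst 4 with
    | some a, some b, some d, some e =>
      let c : Int := (d - a) * 6
      let c : Int :=
        if e > b then
          (PySem.List.pyRange b (e + 1) 1).foldl
            (fun c i => if PySem.Int.mod i 11 = 0 ∨ i = 0 then c + 1 else c) c
        else if e < b then
          (PySem.List.pyRange e (b + 1) 1).foldl
            (fun c i => if PySem.Int.mod i 11 = 0 ∨ i = 0 then c - 1 else c) c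
        else if e = b then c + 1 else c
      if d ≤ 19 ∧ a ≥ 16 then some 0
      else if d > 19 ∧ a < 6 then
        (let c := c - 48; if c < 0 then some 0 else some c)
      else if d ≤ 9 ∧ a ≥ 6 then some 0
      else if d < 16 ∧ d > 9 ∧ a < 6 then
        (let c := c - 24; if c < 0 then some 0 else some c)
      else if a < 5 ∧ d > 19 then
        (let c := c - 48; if c < 0 then some 0 else some c)
      else if d < 5 ∨ (a > 9 ∧ d < 16) ∨ (a > 19 ∧ d ≤ 23) then some c
      else none
    | _, _, _, _ => none   -- unreachable under Pre_ (IndexError in Python)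

-- ===== PORT B =====
def palindrome_time_alt (lst : List Int) : Option Int :=
  if PySem.List.slice lst (some 0) (some 3) = PySem.List.slice lst (some 3) (some 6) then some 1
  else
    match PySem.List.pyGet? lst 0 with
    | none => none   -- unreachable under Pre_ (IndexError in Python)
    | some a =>
    match PySem.List.pyGet? lst 1 with
    | none => none
    | some b =>
    match PySem.List.pyGet? lst 3 with
    | none => none
    | some d =>
    match PySem.List.pyGet? lst 4 with
    | none => none
    | some e =>
      let c0 : Int := (d - a) * 6
      let c : Int :=
        if e > b then c0 + (PySem.Int.floordiv e 11 - PySem.Int.floordiv (b - 1) 11)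
        else if e < b then c0 - (PySem.Int.floordiv b 11 - PySem.Int.floordiv (e - 1) 11)
        else c0 + 1
      if (d ≤ 19 ∧ a ≥ 16) ∨ (d ≤ 9 ∧ a ≥ 6) then some 0
      else if d > 19 ∧ a < 6 then some (max (c - 48) 0)
      else if 9 < d ∧ d < 16 ∧ a < 6 then some (max (c - 24) 0)
      else if d < 5 ∨ (a > 9 ∧ d < 16) ∨ (a > 19 ∧ d ≤ 23) then some c
      else none

-- ===== PRECONDITION & SPEC =====
-- Pre_ excludes exactly the lists of length 1..4, on which the Python A raises IndexError
-- (the slices differ, so lst[3] or lst[4] is accessed out of range); B raises there too.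
def Pre_palindrome_time (lst : List Int) : Prop := lst = [] ∨ 5 ≤ lst.length
instance (lst : List Int) : Decidable (Pre_palindrome_time lst) := by
  unfold Pre_palindrome_time; infer_instance
def pvWitness_palindrome_time : List Int := [1, 2, 3, 4, 5]
def Spec_palindrome_time (lst : List Int) (out : Option Int) : Prop := out = palindrome_time_alt lst
instance (lst : List Int) (out : Option Int) : Decidable (Spec_palindrome_time lst out) := by
  unfold Spec_palindrome_time; infer_instance

-- ===== CLAIM (what is proved, stated in full; the proofs are below) =====
def Claim_equal_palindrome_time : Prop := ∀ (lst : List Int), Dom_palindrome_time lst → Pre_palindrome_time lst → Spec_palindrome_time lst (palindrome_time lst)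

-- ===== LEMMAS AND PROOFS =====

-- floor-division step: hi//11 - (hi-1)//11 is 1 exactly at multiples of 11.
theorem fd_step (hi : Int) :
    PySem.Int.floordiv hi 11 - PySem.Int.floordiv (hi - 1) 11
      = if PySem.Int.mod hi 11 = 0 ∨ hi = 0 then 1 else 0 := by
  rw [PySem.Int.floordiv_eq_ediv_of_pos (by norm_num),
      PySem.Int.floordiv_eq_ediv_of_pos (by norm_num),
      PySem.Int.mod_eq_emod_of_pos (by norm_num)]
  split_ifs with h
  · rcases h with h | h <;> omega
  · omega

-- Multiples of 11 in [lo, hi] counted one by one = hi//11 - (lo-1)//11 (floor division).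
theorem count_eleven_fold (lo hi : Int) (h : lo ≤ hi + 1) (c : Int) :
    (PySem.List.pyRange lo (hi + 1) 1).foldl
      (fun c i => if PySem.Int.mod i 11 = 0 ∨ i = 0 then c + 1 else c) c
    = c + (PySem.Int.floordiv hi 11 - PySem.Int.floordiv (lo - 1) 11) := by
  obtain ⟨n, hn⟩ : ∃ n : Nat, hi + 1 - lo = n := ⟨(hi + 1 - lo).toNat, by omega⟩
  induction n generalizing hi c with
  | zero =>
    rw [PySem.List.pyRange_one_eq_nil (by omega)]
    have he : hi = lo - 1 := by omega
    subst he; simp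
  | succ n ih =>
    rw [PySem.List.pyRange_one_succ_right (by omega : lo ≤ hi), List.foldl_append,
        show PySem.List.pyRange lo hi 1 = PySem.List.pyRange lo ((hi - 1) + 1) 1 by ring_nf,
        ih (hi - 1) (by omega) c (by omega)]
    simp only [List.foldl]
    rw [show PySem.Int.floordiv hi 11
          = PySem.Int.floordiv (hi - 1) 11
            + (if PySem.Int.mod hi 11 = 0 ∨ hi = 0 then 1 else 0) by
        rw [← fd_step hi]; ring]
    split_ifs <;> ring

theorem count_eleven_fold_sub (lo hi : Int) (h : lo ≤ hi + 1) (c : Int) :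
    (PySem.List.pyRange lo (hi + 1) 1).foldl
      (fun c i => if PySem.Int.mod i 11 = 0 ∨ i = 0 then c - 1 else c) c
    = c - (PySem.Int.floordiv hi 11 - PySem.Int.floordiv (lo - 1) 11) := by
  obtain ⟨n, hn⟩ : ∃ n : Nat, hi + 1 - lo = n := ⟨(hi + 1 - lo).toNat, by omega⟩
  induction n generalizing hi c with
  | zero =>
    rw [PySem.List.pyRange_one_eq_nil (by omega)]
    have he : hi = lo - 1 := by omega
    subst he; simp
  | succ n ih =>
    rw [PySem.List.pyRange_one_succ_right (by omega : lo ≤ hi), List.foldl_append,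
        show PySem.List.pyRange lo hi 1 = PySem.List.pyRange lo ((hi - 1) + 1) 1 by ring_nf,
        ih (hi - 1) (by omega) c (by omega)]
    simp only [List.foldl]
    rw [show PySem.Int.floordiv hi 11
          = PySem.Int.floordiv (hi - 1) 11
            + (if PySem.Int.mod hi 11 = 0 ∨ hi = 0 then 1 else 0) by
        rw [← fd_step hi]; ring]
    split_ifs <;> ring

-- The two trailing branch chains agree for every a d and common c.
theorem chains_eq (a d c : Int) :
    (if d ≤ 19 ∧ a ≥ 16 then some (0 : Int)
     else if d > 19 ∧ a < 6 then (if c - 48 < 0 then some 0 else some (c - 48))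
     else if d ≤ 9 ∧ a ≥ 6 then some 0
     else if d < 16 ∧ d > 9 ∧ a < 6 then (if c - 24 < 0 then some 0 else some (c - 24))
     else if a < 5 ∧ d > 19 then (if c - 48 < 0 then some 0 else some (c - 48))
     else if d < 5 ∨ (a > 9 ∧ d < 16) ∨ (a > 19 ∧ d ≤ 23) then some c
     else none)
    =
    (if (d ≤ 19 ∧ a ≥ 16) ∨ (d ≤ 9 ∧ a ≥ 6) then some (0 : Int)
     else if d > 19 ∧ a < 6 then some (max (c - 48) 0)
     else if 9 < d ∧ d < 16 ∧ a < 6 then some (max (c - 24) 0)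
     else if d < 5 ∨ (a > 9 ∧ d < 16) ∨ (a > 19 ∧ d ≤ 23) then some c
     else none) := by
  split_ifs <;> simp_all <;> omega


-- The two function cores agree for all four extracted values.
theorem core_eq (a b d e : Int) :
    (let c : Int := (d - a) * 6
     let c : Int :=
       if e > b then
         (PySem.List.pyRange b (e + 1) 1).foldl
           (fun c i => if PySem.Int.mod i 11 = 0 ∨ i = 0 then c + 1 else c) c
       else if e < b then
         (PySem.List.pyRange e (b + 1) 1).foldl
           (fun c i => if PySem.Int.mod i 11 = 0 ∨ i = 0 then c - 1 else c) c
       else if e = b then c + 1 else c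
     if d ≤ 19 ∧ a ≥ 16 then some 0
     else if d > 19 ∧ a < 6 then
       (let c := c - 48; if c < 0 then some 0 else some c)
     else if d ≤ 9 ∧ a ≥ 6 then some 0
     else if d < 16 ∧ d > 9 ∧ a < 6 then
       (let c := c - 24; if c < 0 then some 0 else some c)
     else if a < 5 ∧ d > 19 then
       (let c := c - 48; if c < 0 then some 0 else some c)
     else if d < 5 ∨ (a > 9 ∧ d < 16) ∨ (a > 19 ∧ d ≤ 23) then some c
     else none)
    =
    (let c0 : Int := (d - a) * 6
     let c : Int :=
       if e > b then c0 + (PySem.Int.floordiv e 11 - PySem.Int.floordiv (b - 1) 11)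
       else if e < b then c0 - (PySem.Int.floordiv b 11 - PySem.Int.floordiv (e - 1) 11)
       else c0 + 1
     if (d ≤ 19 ∧ a ≥ 16) ∨ (d ≤ 9 ∧ a ≥ 6) then some 0
     else if d > 19 ∧ a < 6 then some (max (c - 48) 0)
     else if 9 < d ∧ d < 16 ∧ a < 6 then some (max (c - 24) 0)
     else if d < 5 ∨ (a > 9 ∧ d < 16) ∨ (a > 19 ∧ d ≤ 23) then some c
     else none) := by
  simp only [gt_iff_lt]
  rcases lt_trichotomy b e with hbe | hbe | hbe
  · rw [if_pos hbe, if_pos hbe,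
        count_eleven_fold b e (by omega) ((d - a) * 6)]
    exact chains_eq a d _
  · subst hbe
    rw [if_neg (lt_irrefl b), if_neg (lt_irrefl b), if_neg (lt_irrefl b),
        if_neg (lt_irrefl b), if_pos rfl]
    exact chains_eq a d _
  · rw [if_neg (by omega : ¬ b < e), if_neg (by omega : ¬ b < e),
        if_pos hbe, if_pos hbe,
        count_eleven_fold_sub e b (by omega) ((d - a) * 6)]
    exact chains_eq a d _

-- ===== VERDICT (by name: the statement is the Claim_ definition above) =====
theorem palindrome_time_spec : Claim_equal_palindrome_time := by
  intro lst _hdom hpre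
  unfold Spec_palindrome_time palindrome_time palindrome_time_alt
  by_cases hs : PySem.List.slice lst (some 0) (some 3) = PySem.List.slice lst (some 3) (some 6)
  · simp [hs]
  · rcases hpre with h0 | h5
    · subst h0; exact absurd rfl hs
    · match lst, h5 with
      | a :: b :: x :: d :: e :: rest, _ =>
        have g0 : PySem.List.pyGet? (a :: b :: x :: d :: e :: rest) 0 = some a := by
          simp [PySem.List.pyGet?, PySem.List.pyIdx?]; rw [if_pos (by omega)]; simp
        have g1 : PySem.List.pyGet? (a :: b :: x :: d :: e :: rest) 1 = some b := by
          simp [PySem.List.pyGet?, PySem.List.pyIdx?]; rw [if_pos (by omega)]; simp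
        have g3 : PySem.List.pyGet? (a :: b :: x :: d :: e :: rest) 3 = some d := by
          simp [PySem.List.pyGet?, PySem.List.pyIdx?]; rw [if_pos (by omega)]; simp
        have g4 : PySem.List.pyGet? (a :: b :: x :: d :: e :: rest) 4 = some e := by
          simp [PySem.List.pyGet?, PySem.List.pyIdx?]; rw [if_pos (by omega)]; simp
        rw [if_neg hs, if_neg hs, g0, g1, g3, g4]
        exact core_eq a b d e
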